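-- pv_equiv track=rewrite | github.com/mathisfun271/math2243 | Derivative Calculator (v1.0).py | findLi
-- ===== SOURCE A (Python) =====
-- def findLi(s,fds):
--     ret = []
--     for fd in fds:
--         index = 0
--         while index<len(s):
--             index = s.find(fd,index)
--             if index == -1:
--                 break
--             ret.append([index,len(fd)])
--             index+= len(fd)
--     ret.sort()
--     return ret
-- ===== SOURCE B (Python) =====
-- def findLi(s, fds):
--     # Position-major scan: walk s once left-to-right; at each position collect the
--     # patterns matching there (each pattern carries its own non-overlap cursor),
--     # emitting results already in sorted order -- no global sort at the end.
--     n = len(s)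
--     state = [(fd, 0) for fd in fds]          # (pattern, next allowed position)
--     out = []
--     for i in range(n):
--         hits = []
--         new_state = []
--         for fd, nxt in state:
--             if nxt <= i and s.startswith(fd, i):
--                 hits.append(len(fd))
--                 new_state.append((fd, i + len(fd)))
--             else:
--                 new_state.append((fd, nxt))
--         state = new_state
--         hits.sort()
--         for l in hits:
--             out.append([i, l])
--     return out
-- ===== Notes on version B (the rewrite author's own statement) =====
-- stated objective: alternative
-- what changed: A runs a separate find-loop over the whole string for every pattern and then sorts the combined result; B walks the string once left-to-right, keeping a non-overlap cursor per pattern, and emits the matches already in sorted order with no global sort.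
import Mathlib
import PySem

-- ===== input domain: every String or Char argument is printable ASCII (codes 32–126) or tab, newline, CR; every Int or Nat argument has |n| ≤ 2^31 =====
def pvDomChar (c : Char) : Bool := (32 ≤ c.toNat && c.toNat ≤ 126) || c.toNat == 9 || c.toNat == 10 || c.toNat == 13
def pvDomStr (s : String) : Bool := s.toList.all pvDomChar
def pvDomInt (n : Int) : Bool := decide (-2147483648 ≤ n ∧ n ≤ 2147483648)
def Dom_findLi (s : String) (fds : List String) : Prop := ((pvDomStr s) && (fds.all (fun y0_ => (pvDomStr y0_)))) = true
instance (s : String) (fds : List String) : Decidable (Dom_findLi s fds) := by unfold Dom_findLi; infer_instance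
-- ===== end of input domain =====

-- B replaces A's per-pattern find loops plus a global sort by a single left-to-right
-- position scan that emits the matches already in order (objective: alternative).

-- ===== PORT A =====
-- A's inner `while index < len(s)` loop. The loop diverges only for fd = "" on a
-- non-empty s (excluded by Pre_); otherwise index grows by at least 1 per iteration,
-- so fuel = len(s)+1 makes this port exact on Pre_.
def findLiLoop (s fd : String) : Nat → Int → List (List Int) → List (List Int)
  | 0, _, ret => ret
  | fuel + 1, index, ret =>
    if index < PySem.Str.len s then
      let index' := PySem.Str.findFrom s fd index
      if index' = -1 then ret
      else findLiLoop s fd fuel (index' + PySem.Str.len fd) (ret ++ [[index', PySem.Str.len fd]])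
    else ret

def findLi (s : String) (fds : List String) : List (List Int) :=
  let ret := fds.foldl (fun ret fd => findLiLoop s fd (s.toList.length + 1) 0 ret) []
  PySem.List.sorted ret (fun x => x) false

-- ===== PORT B =====
-- one position step of B: fold over `state`, collecting (hits, new_state)
-- (s.startswith(fd, i) ported as prefix-of-drop: exact for 0 ≤ i ≤ len(s),
-- which holds for every i produced by range(n))
def findLiStep (s : String) (i : Int) (st : List (String × Int)) :
    List Int × List (String × Int) :=
  st.foldl (fun (p : List Int × List (String × Int)) fn =>
    if fn.2 ≤ i ∧ PySem.Chars.startswith (s.toList.drop i.toNat) fn.1.toList = true then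
      (p.1 ++ [PySem.Str.len fn.1], p.2 ++ [(fn.1, i + PySem.Str.len fn.1)])
    else (p.1, p.2 ++ [(fn.1, fn.2)])) ([], [])

def findLi_alt (s : String) (fds : List String) : List (List Int) :=
  let n := PySem.Str.len s
  let state : List (String × Int) := fds.map (fun fd => (fd, (0 : Int)))
  let res := (PySem.List.pyRange 0 n 1).foldl
    (fun (st : List (String × Int) × List (List Int)) i =>
      let inner := findLiStep s i st.1
      let hits := PySem.List.sorted inner.1 (fun x => x) false
      (inner.2, st.2 ++ hits.map (fun l => [i, l]))) (state, [])
  res.2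

-- ===== PRECONDITION & SPEC =====
-- Pre_ excludes exactly the inputs where A never returns: with '' among the patterns
-- and s non-empty, `s.find('', index)` returns index and `index += 0` loops forever.
def Pre_findLi (s : String) (fds : List String) : Prop := s = "" ∨ "" ∉ fds
instance (s : String) (fds : List String) : Decidable (Pre_findLi s fds) := by
  unfold Pre_findLi; infer_instance

def pvWitness_findLi : String × List String := ("abcabab", ["ab", "b", "ca"])

def Spec_findLi (s : String) (fds : List String) (out : List (List Int)) : Prop := out = findLi_alt s fds
instance (s : String) (fds : List String) (out : List (List Int)) : Decidable (Spec_findLi s fds out) := by unfold Spec_findLi; infer_instance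

-- ===== CLAIM (what is proved, stated in full; the proofs are below) =====
def Claim_equal_findLi : Prop := ∀ (s : String) (fds : List String), Dom_findLi s fds → Pre_findLi s fds → Spec_findLi s fds (findLi s fds)

-- ===== LEMMAS AND PROOFS =====

-- the non-overlap cursor of one pattern after scanning positions 0..i-1 (B's `nxt`)
def curC (cs fd : List Char) : Nat → Nat
  | 0 => 0
  | i + 1 => if curC cs fd i ≤ i ∧ fd <+: cs.drop i then i + fd.length else curC cs fd i

-- "pattern fd is taken at position i" (B's condition, over the cursor)
def hitAt (cs fd : List Char) (i : Nat) : Bool :=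
  decide (curC cs fd i ≤ i ∧ fd <+: cs.drop i)

-- the value A's find-loop computes for one pattern, from start position k
def greedy (cs fd : List Char) : Nat → Nat → List Nat
  | 0, _ => []
  | fuel + 1, k =>
    if k < cs.length then
      let f := PySem.Chars.find (cs.drop k) fd
      if f = -1 then []
      else (k + f.toNat) :: greedy cs fd fuel (k + f.toNat + fd.length)
    else []

theorem curC_mono (cs fd : List Char) {i j : Nat} (h : i ≤ j) :
    curC cs fd i ≤ curC cs fd j := by
  induction j with
  | zero => simp_all
  | succ j ih =>
    rcases Nat.lt_or_ge i (j+1) with hj | hj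
    · have := ih (by omega)
      simp only [curC]
      split <;> rename_i hc
      · have : curC cs fd j ≤ j := hc.1
        omega
      · omega
    · have : i = j + 1 := by omega
      subst this; rfl

theorem noMatchBelow (cs fd : List Char) (hfd : fd ≠ []) {i p : Nat}
    (h1 : curC cs fd i ≤ p) (h2 : p < i) : ¬ fd <+: cs.drop p := by
  intro hpre
  have hlen : 0 < fd.length := List.length_pos_iff.mpr hfd
  have hcp : curC cs fd p ≤ curC cs fd i := curC_mono cs fd (by omega)
  have hP : curC cs fd p ≤ p ∧ fd <+: cs.drop p := ⟨by omega, hpre⟩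
  have hstep : curC cs fd (p+1) = p + fd.length := by
    simp only [curC]; rw [if_pos hP]
  have : curC cs fd (p+1) ≤ curC cs fd i := curC_mono cs fd (by omega)
  omega

theorem greedy_fuel_irrel (cs fd : List Char) (hfd : fd ≠ []) :
    ∀ (fuel fuel' k : Nat), cs.length + 1 - k ≤ fuel → cs.length + 1 - k ≤ fuel' →
      greedy cs fd fuel k = greedy cs fd fuel' k := by
  intro fuel
  induction fuel with
  | zero =>
    intro fuel' k h1 _
    have hk : cs.length < k := by omega
    cases fuel' with
    | zero => rfl
    | succ m => simp [greedy, Nat.not_lt.mpr (Nat.le_of_lt hk)]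
  | succ fuel ih =>
    intro fuel' k h1 h2
    cases fuel' with
    | zero =>
      have hk : cs.length < k := by omega
      simp [greedy, Nat.not_lt.mpr (Nat.le_of_lt hk)]
    | succ m =>
      simp only [greedy]
      split
      · rename_i hkn
        split
        · rfl
        · rename_i hf
          have hlen : 0 < fd.length := List.length_pos_iff.mpr hfd
          congr 1
          exact ih m _ (by omega) (by omega)
      · rfl

-- no greedy match at or beyond position n: greedy from curC n is empty


theorem findLiLoop_eq_greedy (s fd : String) :
    ∀ (fuel : Nat) (k : Nat) (ret : List (List Int)), k ≤ s.toList.length →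
      findLiLoop s fd fuel (k : Int) ret =
        ret ++ (greedy s.toList fd.toList fuel k).map
          (fun p : Nat => [(p : Int), (fd.toList.length : Int)]) := by
  intro fuel
  induction fuel with
  | zero => intro k ret _; simp [findLiLoop, greedy]
  | succ fuel ih =>
    intro k ret hk
    simp only [findLiLoop, greedy, PySem.Str.len_eq, PySem.Str.findFrom_eq]
    rw [PySem.Chars.findFrom_natCast s.toList fd.toList k hk]
    by_cases hlt : k < s.toList.length
    · rw [if_pos (by exact_mod_cast hlt), if_pos hlt]
      set f := PySem.Chars.find (s.toList.drop k) fd.toList with hf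
      by_cases hneg : f = -1
      · simp [hneg]
      · rw [if_neg hneg]
        have hge : 0 ≤ f := by have := PySem.Chars.neg_one_le_find (s.toList.drop k) fd.toList; omega
        have hne2 : ¬ ((k : Int) + f = -1) := by omega
        rw [if_neg hne2]
        have hcast : (k : Int) + f = ((k + f.toNat : Nat) : Int) := by omega
        have hspec := PySem.Chars.find_spec (s := s.toList.drop k) (sub := fd.toList) hge
        have hpre : fd.toList <+: s.toList.drop (k + f.toNat) := by
          have h := hspec.1
          rw [List.drop_drop] at h
          exact h
        have hlen : fd.toList.length ≤ s.toList.length - (k + f.toNat) := by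
          have h1 := hpre.length_le
          simpa using h1
        have hfle : f ≤ (s.toList.drop k).length := PySem.Chars.find_le_length _ _
        have hk' : k + f.toNat + fd.toList.length ≤ s.toList.length := by
          simp only [List.length_drop] at hfle
          have h2 : f.toNat ≤ s.toList.length - k := by omega
          omega
        have hrec := ih (k + f.toNat + fd.toList.length)
          (ret ++ [[((k + f.toNat : Nat) : Int), (fd.toList.length : Int)]]) hk'
        rw [hcast]
        push_cast at hrec ⊢
        rw [hrec]
        rw [if_neg hneg]
        simp [Int.toNat_of_nonneg hge]
    · rw [if_neg (by exact_mod_cast hlt), if_neg hlt]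
      simp


theorem greedy_from_cur_top (cs fd : List Char) (hfd : fd ≠ []) :
    greedy cs fd (cs.length + 1) (curC cs fd cs.length) = [] := by
  simp only [greedy]
  split
  · rename_i hlt
    have hfneg : PySem.Chars.find (cs.drop (curC cs fd cs.length)) fd = -1 := by
      rw [PySem.Chars.find_eq_neg_one_iff]
      intro hinf
      obtain ⟨j, hj⟩ := (PySem.Chars.exists_prefix_drop_iff_isIn fd (cs.drop (curC cs fd cs.length))).mpr
        ((PySem.Chars.isIn_iff_infix _ _).mpr hinf)
      rw [List.drop_drop] at hj
      by_cases hp : curC cs fd cs.length + j < cs.length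
      · exact noMatchBelow cs fd hfd (i := cs.length) (p := curC cs fd cs.length + j)
          (by omega) hp hj
      · have hnil : cs.drop (curC cs fd cs.length + j) = [] :=
          List.drop_eq_nil_of_le (by omega)
        rw [hnil] at hj
        exact hfd (List.prefix_nil.mp hj)
    simp [hfneg]
  · rfl

theorem filter_hitAt_eq_greedy (cs fd : List Char) (hfd : fd ≠ []) :
    ∀ (d a : Nat), a ≤ cs.length → cs.length - a = d →
      (List.range' a (cs.length - a)).filter (hitAt cs fd) =
        greedy cs fd (cs.length + 1) (curC cs fd a) := by
  intro d
  induction d with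
  | zero =>
    intro a ha hd
    have : a = cs.length := by omega
    subst this
    rw [hd]
    simp only [List.range'_zero, List.filter_nil]
    exact (greedy_from_cur_top cs fd hfd).symm
  | succ d ih =>
    intro a ha hd
    have hlt : a < cs.length := by omega
    rw [hd, List.range'_succ, List.filter_cons]
    by_cases hP : curC cs fd a ≤ a ∧ fd <+: cs.drop a
    · have hhit : hitAt cs fd a = true := by simp [hitAt, hP]
      rw [if_pos (by simp [hhit])]
      have hcur1 : curC cs fd (a+1) = a + fd.length := by
        simp only [curC]; rw [if_pos hP]
      have hflen : 0 < fd.length := List.length_pos_iff.mpr hfd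
      -- RHS: unfold greedy once
      have hguard : curC cs fd a < cs.length := by omega
      -- find over drop (curC a) points exactly at a
      have hge0 : 0 ≤ PySem.Chars.find (cs.drop (curC cs fd a)) fd := by
        rw [PySem.Chars.find_nonneg_iff]
        apply ((PySem.Chars.isIn_iff_infix _ _).mp)
        apply (PySem.Chars.exists_prefix_drop_iff_isIn fd _).mp
        exact ⟨a - curC cs fd a, by rw [List.drop_drop]; rw [show curC cs fd a + (a - curC cs fd a) = a by omega]; exact hP.2⟩
      set f := PySem.Chars.find (cs.drop (curC cs fd a)) fd with hfdef
      have hspec := PySem.Chars.find_spec (s := cs.drop (curC cs fd a)) (sub := fd) hge0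
      have hfval : curC cs fd a + f.toNat = a := by
        have hle : f.toNat ≤ a - curC cs fd a := by
          by_contra hgt
          exact hspec.2 (a - curC cs fd a) (by omega)
            (by rw [List.drop_drop, show curC cs fd a + (a - curC cs fd a) = a by omega]; exact hP.2)
        have hge : ¬ (curC cs fd a + f.toNat < a) := by
          intro hlt2
          have hpre : fd <+: cs.drop (curC cs fd a + f.toNat) := by
            have h := hspec.1
            rw [List.drop_drop] at h
            exact h
          exact noMatchBelow cs fd hfd (i := a) (p := curC cs fd a + f.toNat) (by omega) (by omega) hpre
        omega
      have hfne : ¬ (f = -1) := by omega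
      conv_rhs => rw [show cs.length + 1 = (cs.length) + 1 from rfl]
      simp only [greedy]
      rw [if_pos hguard, if_neg hfne]
      rw [hfval]
      rw [greedy_fuel_irrel cs fd hfd cs.length (cs.length + 1) (a + fd.length) (by omega) (by omega)]
      rw [← hcur1]
      rw [show d = cs.length - (a+1) by omega, ih (a+1) (by omega) (by omega)]
    · have hhit : hitAt cs fd a = false := by simp [hitAt]; intro h1 h2; exact hP ⟨h1, h2⟩
      rw [if_neg (by simp [hhit])]
      have hcur1 : curC cs fd (a+1) = curC cs fd a := by
        simp only [curC]; rw [if_neg hP]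
      rw [show d = cs.length - (a+1) by omega, ih (a+1) (by omega) (by omega), hcur1]


theorem findLiStep_foldl (s : String) (i : Int) :
    ∀ (st : List (String × Int)) (h1 : List Int) (h2 : List (String × Int)),
      st.foldl (fun (p : List Int × List (String × Int)) fn =>
        if fn.2 ≤ i ∧ PySem.Chars.startswith (s.toList.drop i.toNat) fn.1.toList = true then
          (p.1 ++ [PySem.Str.len fn.1], p.2 ++ [(fn.1, i + PySem.Str.len fn.1)])
        else (p.1, p.2 ++ [(fn.1, fn.2)])) (h1, h2) =
      (h1 ++ st.filterMap (fun fn =>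
          if fn.2 ≤ i ∧ PySem.Chars.startswith (s.toList.drop i.toNat) fn.1.toList = true
          then some (PySem.Str.len fn.1) else none),
       h2 ++ st.map (fun fn =>
          if fn.2 ≤ i ∧ PySem.Chars.startswith (s.toList.drop i.toNat) fn.1.toList = true
          then (fn.1, i + PySem.Str.len fn.1) else (fn.1, fn.2))) := by
  intro st
  induction st with
  | nil => intro h1 h2; simp
  | cons fn st ih =>
    intro h1 h2
    simp only [List.foldl_cons, List.filterMap_cons, List.map_cons]
    by_cases hc : fn.2 ≤ i ∧ PySem.Chars.startswith (s.toList.drop i.toNat) fn.1.toList = true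
    · rw [if_pos hc, ih]
      simp [hc]
    · rw [if_neg hc, ih]
      simp [hc]


def hitLens (s : String) (fds : List String) (i : Nat) : List Int :=
  fds.filterMap (fun fd => if hitAt s.toList fd.toList i then some ((fd.toList.length : Int)) else none)

-- B's output after scanning positions 0..m-1
def bOut (s : String) (fds : List String) (m : Nat) : List (List Int) :=
  (List.range m).flatMap (fun i =>
    (PySem.List.sorted (hitLens s fds i) (fun x => x) false).map (fun l => [(i : Int), l]))

theorem outer_inv (s : String) (fds : List String) :
    ∀ (m : Nat),
      ((List.range m).map (Nat.cast : Nat → Int)).foldl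
        (fun (st : List (String × Int) × List (List Int)) i =>
          let inner := findLiStep s i st.1
          let hits := PySem.List.sorted inner.1 (fun x => x) false
          (inner.2, st.2 ++ hits.map (fun l => [i, l])))
        (fds.map (fun fd => (fd, (0 : Int))), []) =
      (fds.map (fun fd => (fd, (curC s.toList fd.toList m : Int))), bOut s fds m) := by
  intro m
  induction m with
  | zero => simp [bOut, curC]
  | succ m ih =>
    rw [List.range_succ, List.map_append, List.foldl_append, ih]
    simp only [List.map_cons, List.map_nil, List.foldl_cons, List.foldl_nil]
    have hstep : findLiStep s (m : Int) (fds.map (fun fd => (fd, (curC s.toList fd.toList m : Int)))) =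
        (hitLens s fds m, fds.map (fun fd => (fd, (curC s.toList fd.toList (m+1) : Int)))) := by
      unfold findLiStep
      rw [findLiStep_foldl]
      rw [List.filterMap_map, List.map_map]
      simp only [List.nil_append, Prod.mk.injEq]
      constructor
      · unfold hitLens
        apply List.filterMap_congr
        intro fd hfd
        by_cases hc : curC s.toList fd.toList m ≤ m ∧ fd.toList <+: s.toList.drop m
        · have hcond : ((curC s.toList fd.toList m : Int) ≤ (m : Int) ∧
              PySem.Chars.startswith (List.drop ((m : Int)).toNat s.toList) fd.toList = true) := by
            constructor
            · exact_mod_cast hc.1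
            · rw [Int.toNat_natCast, PySem.Chars.startswith_iff]; exact hc.2
          simp [Function.comp, hitAt, hc.1, hc.2, hcond, PySem.Str.len_eq, PySem.Chars.startswith_iff]
        · have hcond : ¬ ((curC s.toList fd.toList m : Int) ≤ (m : Int) ∧
              PySem.Chars.startswith (List.drop ((m : Int)).toNat s.toList) fd.toList = true) := by
            rw [Int.toNat_natCast, PySem.Chars.startswith_iff, Nat.cast_le]
            exact hc
          simp [Function.comp, hitAt, PySem.Chars.startswith_iff]
      · apply List.map_congr_left
        intro fd hfd
        by_cases hc : curC s.toList fd.toList m ≤ m ∧ fd.toList <+: s.toList.drop m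
        · have hcond : ((curC s.toList fd.toList m : Int) ≤ (m : Int) ∧
              PySem.Chars.startswith (List.drop ((m : Int)).toNat s.toList) fd.toList = true) := by
            constructor
            · exact_mod_cast hc.1
            · rw [Int.toNat_natCast, PySem.Chars.startswith_iff]; exact hc.2
          have hcur : curC s.toList fd.toList (m+1) = m + fd.toList.length := by
            simp only [curC]; rw [if_pos hc]
          simp [Function.comp, hc.2, hcond, hcur, PySem.Str.len_eq, PySem.Chars.startswith_iff]
        · have hcond : ¬ ((curC s.toList fd.toList m : Int) ≤ (m : Int) ∧
              PySem.Chars.startswith (List.drop ((m : Int)).toNat s.toList) fd.toList = true) := by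
            rw [Int.toNat_natCast, PySem.Chars.startswith_iff, Nat.cast_le]
            exact hc
          have hcur : curC s.toList fd.toList (m+1) = curC s.toList fd.toList m := by
            simp only [curC]; rw [if_neg hc]
          simp [Function.comp, hcur, PySem.Chars.startswith_iff]
          tauto
    rw [hstep]
    simp only [bOut, List.range_succ, List.flatMap_append, List.flatMap_cons, List.flatMap_nil,
      List.append_nil]

theorem findLi_alt_eq_bOut (s : String) (fds : List String) :
    findLi_alt s fds = bOut s fds s.toList.length := by
  unfold findLi_alt
  simp only [PySem.Str.len_eq, PySem.List.pyRange_zero_natCast]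
  rw [show (List.map (fun k => ((k : Nat) : Int)) (List.range s.toList.length))
      = List.map (Nat.cast : Nat → Int) (List.range s.toList.length) from rfl]
  rw [outer_inv]

theorem findLi_eq_sorted (s : String) (fds : List String) (hfds : ∀ fd ∈ fds, fd ≠ "") :
    findLi s fds = PySem.List.sorted
      (fds.flatMap (fun fd => ((List.range s.toList.length).filter (hitAt s.toList fd.toList)).map
        (fun p : Nat => [(p : Int), (fd.toList.length : Int)])))
      (fun x => x) false := by
  unfold findLi
  dsimp only
  congr 1
  have hfun : (fun (ret : List (List Int)) fd => findLiLoop s fd (s.toList.length + 1) 0 ret)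
      = fun ret fd => ret ++ (greedy s.toList fd.toList (s.toList.length + 1) 0).map
          (fun p : Nat => [(p : Int), (fd.toList.length : Int)]) := by
    funext ret fd
    have := findLiLoop_eq_greedy s fd (s.toList.length + 1) 0 ret (Nat.zero_le _)
    simpa using this
  rw [hfun, PySem.List.foldl_append_eq_flatMap, List.nil_append]
  apply List.flatMap_congr
  intro fd hfd
  have hne : fd.toList ≠ [] := by
    intro h
    exact hfds fd hfd (String.toList_eq_nil_iff.mp h)
  have := filter_hitAt_eq_greedy s.toList fd.toList hne s.toList.length 0 (Nat.zero_le _) (by omega)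
  rw [show curC s.toList fd.toList 0 = 0 from rfl] at this
  rw [← this, List.range_eq_range']
  simp

-- (l.filter p).map f as a filterMap
theorem map_filter_eq_filterMap {α β : Type} (p : α → Bool) (f : α → β) (l : List α) :
    (l.filter p).map f = l.filterMap (fun a => if p a then some (f a) else none) := by
  induction l with
  | nil => rfl
  | cons a l ih =>
    rw [List.filter_cons, List.filterMap_cons]
    by_cases h : p a
    · simp [h, ih]
    · simp [h, ih]

theorem perm_flatMap_append {α γ : Type} (m : List α) (u v : α → List γ) :
    (m.flatMap (fun b => u b ++ v b)).Perm (m.flatMap u ++ m.flatMap v) := by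
  induction m with
  | nil => simp
  | cons b m ih =>
    simp only [List.flatMap_cons]
    refine (List.Perm.append_left (u b ++ v b) ih).trans ?_
    simp only [List.append_assoc]
    refine List.Perm.append_left (u b) ?_
    rw [← List.append_assoc, ← List.append_assoc]
    exact List.Perm.append_right _ List.perm_append_comm

-- exchanging the two iteration orders is a permutation
theorem perm_flatMap_filterMap_comm {α β γ : Type} (l : List α) (m : List β)
    (g : α → β → Option γ) :
    (l.flatMap (fun a => m.filterMap (g a))).Perm
      (m.flatMap (fun b => l.filterMap (fun a => g a b))) := by
  induction l with
  | nil => simp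
  | cons a l ih =>
    simp only [List.flatMap_cons]
    have hsplit : (m.flatMap fun b => List.filterMap (fun a' => g a' b) (a :: l)) =
        m.flatMap (fun b => (g a b).toList ++ l.filterMap (fun a' => g a' b)) := by
      apply List.flatMap_congr
      intro b _
      rw [List.filterMap_cons]
      cases g a b <;> simp
    rw [hsplit]
    refine (List.Perm.append_left _ ih).trans ?_
    have h2 : m.filterMap (g a) = m.flatMap (fun b => (g a b).toList) :=
      List.filterMap_eq_flatMap_toList _ _
    rw [h2]
    exact (perm_flatMap_append m _ _).symm

theorem bOut_perm (s : String) (fds : List String) :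
    (bOut s fds s.toList.length).Perm
      (fds.flatMap (fun fd => ((List.range s.toList.length).filter (hitAt s.toList fd.toList)).map
        (fun p : Nat => [(p : Int), (fd.toList.length : Int)]))) := by
  unfold bOut
  have h1 : ∀ i ∈ List.range s.toList.length,
      ((PySem.List.sorted (hitLens s fds i) (fun x => x) false).map
        (fun l => [(i : Int), l])).Perm
      (fds.filterMap (fun fd => if hitAt s.toList fd.toList i
          then some [(i : Int), (fd.toList.length : Int)] else none)) := by
    intro i _
    have hp : (PySem.List.sorted (hitLens s fds i) (fun x => x) false).Perm (hitLens s fds i) :=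
      PySem.List.sorted_perm _ _ _
    refine ((hp.map (fun l => [(i : Int), l]))).trans ?_
    unfold hitLens
    rw [List.map_filterMap]
    apply List.Perm.of_eq
    apply List.filterMap_congr
    intro fd _
    by_cases h : hitAt s.toList fd.toList i <;> simp [h]
  refine (List.Perm.flatMap_left (List.range s.toList.length) h1).trans ?_
  refine (perm_flatMap_filterMap_comm (List.range s.toList.length) fds
    (fun i fd => if hitAt s.toList fd.toList i
      then some [(i : Int), (fd.toList.length : Int)] else none)).trans ?_
  apply List.Perm.of_eq
  apply List.flatMap_congr
  intro fd _
  rw [map_filter_eq_filterMap]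

theorem pair_le_of_snd_le (i a b : Int) (h : a ≤ b) : [i, a] ≤ [i, b] := by
  rcases lt_or_eq_of_le h with hlt | heq
  · exact le_of_lt (List.Lex.cons (List.Lex.rel hlt))
  · rw [heq]

theorem pair_le_of_fst_lt (i j a b : Int) (h : i < j) : [i, a] ≤ [j, b] :=
  le_of_lt (List.Lex.rel h)

theorem bOut_pairwise (s : String) (fds : List String) :
    (bOut s fds s.toList.length).Pairwise (fun a b => a ≤ b) := by
  unfold bOut
  rw [List.pairwise_flatMap]
  constructor
  · intro i _
    apply List.Pairwise.map
    · intro a b hab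
      exact pair_le_of_snd_le (i : Int) a b hab
    · exact PySem.List.sorted_pairwise (hitLens s fds i) (fun x => x)
  · apply List.Pairwise.imp ?_ (List.pairwise_lt_range (n := s.toList.length))
    intro i j hij x hx y hy
    obtain ⟨a, _, rfl⟩ := List.mem_map.mp hx
    obtain ⟨b, _, rfl⟩ := List.mem_map.mp hy
    exact pair_le_of_fst_lt _ _ _ _ (by exact_mod_cast hij)

-- ===== VERDICT (by name: the statement is the Claim_ definition above) =====
theorem findLi_spec : Claim_equal_findLi := by
  intro s fds _ hpre
  unfold Spec_findLi
  rcases hpre with hse | hmem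
  · subst hse
    have ha : findLi "" fds = [] := by
      unfold findLi
      have hfun : (fun (ret : List (List Int)) fd =>
          findLiLoop "" fd (("" : String).toList.length + 1) 0 ret) = fun ret _ => ret := by
        funext ret fd
        simp [findLiLoop, PySem.Str.len_eq]
      rw [hfun]
      have : ∀ (l : List String) (acc : List (List Int)), l.foldl (fun ret _ => ret) acc = acc := by
        intro l
        induction l with
        | nil => intro acc; rfl
        | cons x l ih => intro acc; exact ih acc
      rw [this]
      rfl
    have hb : findLi_alt "" fds = [] := rfl
    rw [ha, hb]
  · have hfds : ∀ fd ∈ fds, fd ≠ "" := fun fd h hfe => hmem (hfe ▸ h)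
    rw [findLi_eq_sorted s fds hfds, findLi_alt_eq_bOut]
    have h := PySem.List.sorted_id_eq_of_perm_of_pairwise _ _ (bOut_perm s fds) (bOut_pairwise s fds)
    rw [← h]
    congr 1
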